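-- pv_equiv track=rewrite | github.com/nura-j/ABSynth_dataset | absynth/sentence/linguistic_annotator.py | _find_nearest_noun
-- ===== SOURCE A (Python) =====
-- from typing import Dict, List, Any, Optional
--
-- def _find_nearest_noun(adj_idx: int, words: List[str], pos_tags: List[str]) -> int:
--     """Find the nearest noun for adjective attachment."""
--     # Look right first, then left
--     for i in range(adj_idx + 1, len(pos_tags)):
--         if pos_tags[i] == "NN":
--             return i + 1
--     for i in range(adj_idx - 1, -1, -1):
--         if pos_tags[i] == "NN":
--             return i + 1
--     return 1  # Default to first word
-- ===== SOURCE B (Python) =====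
-- from typing import List
--
--
-- def _find_nearest_noun(adj_idx: int, words: List[str], pos_tags: List[str]) -> int:
--     """Find the nearest noun for adjective attachment (right-preferred)."""
--     noun_idxs = [i for i, t in enumerate(pos_tags) if t == "NN"]
--     right = [i for i in noun_idxs if i > adj_idx]
--     if right:
--         return min(right) + 1
--     left = [i for i in noun_idxs if i < adj_idx]
--     if left:
--         return max(left) + 1
--     return 1  # Default to first word
-- ===== Notes on version B (the rewrite author's own statement) =====
-- stated objective: simpler
-- what changed: Replaces A's two directional index-range scans with subscripting by building the noun-index list once via enumerate and selecting min of the indices to the right, else max of those to the left, preserving the right-over-left preference and the +1 offset.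
-- intended difference: For adj_idx <= -2 with an 'NN' tag among the last |adj_idx|-1 positions, A's right scan wraps around via Python negative indexing and returns a non-positive pseudo-index (i+1 with i < 0), while B returns the 1-based index of the first noun, the intended attachment target. — e.g. on _find_nearest_noun(-2, [], ["DT", "NN"]): A returns 0, B returns 2
import Mathlib
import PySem

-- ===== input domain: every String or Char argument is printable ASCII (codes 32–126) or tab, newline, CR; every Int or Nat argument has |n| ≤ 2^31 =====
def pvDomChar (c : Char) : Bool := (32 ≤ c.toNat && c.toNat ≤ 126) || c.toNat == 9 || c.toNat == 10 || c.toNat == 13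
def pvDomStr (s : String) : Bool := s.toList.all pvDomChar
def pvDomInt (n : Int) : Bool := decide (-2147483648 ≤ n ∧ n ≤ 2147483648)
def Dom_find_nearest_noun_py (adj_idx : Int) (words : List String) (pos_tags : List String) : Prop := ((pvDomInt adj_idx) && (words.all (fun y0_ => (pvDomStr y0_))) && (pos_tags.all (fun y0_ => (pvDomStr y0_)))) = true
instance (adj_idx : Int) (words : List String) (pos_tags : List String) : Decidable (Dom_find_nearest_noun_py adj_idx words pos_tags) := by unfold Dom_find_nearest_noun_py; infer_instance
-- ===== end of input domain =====

-- B replaces A's two directional index scans with a single noun-index list built by enumerate,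
-- then min-of-right / max-of-left selection (objective: simpler). On adj_idx ≤ -2 with a noun in the
-- wrapped tail, A returns a non-positive wrapped pseudo-index; B returns the intended 1-based index (see D_).


-- ===== PORT A =====
-- loop body of both of A's for-loops: 'if pos_tags[i] == "NN": return i + 1'
-- (pyGet? = none is Python's IndexError; those inputs are excluded by Pre_ below)
def pvNounHit (pos_tags : List String) (i : Int) : Option Int :=
  match PySem.List.pyGet? pos_tags i with
  | some t => if t = "NN" then some (i + 1) else none
  | none => none

def find_nearest_noun_py (adj_idx : Int) (words : List String) (pos_tags : List String) : Int :=
  -- for i in range(adj_idx + 1, len(pos_tags)): if pos_tags[i] == "NN": return i + 1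
  match (PySem.List.pyRange (adj_idx + 1) (PySem.List.len pos_tags) 1).findSome? (pvNounHit pos_tags) with
  | some r => r
  | none =>
    -- for i in range(adj_idx - 1, -1, -1): if pos_tags[i] == "NN": return i + 1
    match (PySem.List.pyRange (adj_idx - 1) (-1) (-1)).findSome? (pvNounHit pos_tags) with
    | some r => r
    | none => 1

-- ===== PORT B =====
def find_nearest_noun_py_alt (adj_idx : Int) (words : List String) (pos_tags : List String) : Int :=
  -- noun_idxs = [i for i, t in enumerate(pos_tags) if t == "NN"]
  let noun_idxs : List Int :=
    ((PySem.List.enumerate pos_tags 0).filter (fun p => p.2 = "NN")).map Prod.fst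
  -- right = [i for i in noun_idxs if i > adj_idx];  if right: return min(right) + 1
  match PySem.List.min? (noun_idxs.filter (fun i => adj_idx < i)) (fun y => y) with
  | some m => m + 1
  | none =>
    -- left = [i for i in noun_idxs if i < adj_idx];  if left: return max(left) + 1
    match PySem.List.max? (noun_idxs.filter (fun i => i < adj_idx)) (fun y => y) with
    | some m => m + 1
    | none => 1

-- ===== PRECONDITION & SPEC =====
-- A raises IndexError iff adj_idx ≥ len+1 (left scan starts past the end) or adj_idx ≤ -len-2
-- (right scan starts below -len); Pre_ excludes exactly those.
def Pre_find_nearest_noun_py (adj_idx : Int) (words : List String) (pos_tags : List String) : Prop :=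
  -(pos_tags.length : Int) - 1 ≤ adj_idx ∧ adj_idx ≤ (pos_tags.length : Int)
instance (adj_idx : Int) (words : List String) (pos_tags : List String) : Decidable (Pre_find_nearest_noun_py adj_idx words pos_tags) := by unfold Pre_find_nearest_noun_py; infer_instance
def pvWitness_find_nearest_noun_py : Int × List String × List String := (0, [], ["DT", "NN"])

-- On adj_idx ≤ -2 with an "NN" among the last |adj_idx|-1 tags, A's right scan wraps around via
-- Python negative indexing and returns a non-positive pseudo-index i+1 with i < 0, while B returns
-- the 1-based index of the first noun, the intended attachment target.
def D_find_nearest_noun_py (adj_idx : Int) (words : List String) (pos_tags : List String) : Prop :=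
  adj_idx ≤ -2 ∧ "NN" ∈ pos_tags.drop ((pos_tags.length : Int) + adj_idx + 1).toNat
instance (adj_idx : Int) (words : List String) (pos_tags : List String) : Decidable (D_find_nearest_noun_py adj_idx words pos_tags) := by unfold D_find_nearest_noun_py; infer_instance

def Spec_find_nearest_noun_py (adj_idx : Int) (words : List String) (pos_tags : List String) (out : Int) : Prop := ¬ D_find_nearest_noun_py adj_idx words pos_tags → out = find_nearest_noun_py_alt adj_idx words pos_tags
instance (adj_idx : Int) (words : List String) (pos_tags : List String) (out : Int) : Decidable (Spec_find_nearest_noun_py adj_idx words pos_tags out) := by unfold Spec_find_nearest_noun_py; infer_instance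

def pvDiffWitness_find_nearest_noun_py : Int × List String × List String := (-2, [], ["DT", "NN"])
def pvDiffWitnessOut_find_nearest_noun_py : Int × Int := (0, 2)

-- ===== CLAIM (what is proved, stated in full; the proofs are below) =====
def Claim_unchanged_find_nearest_noun_py : Prop := ∀ (adj_idx : Int) (words : List String) (pos_tags : List String), Dom_find_nearest_noun_py adj_idx words pos_tags → Pre_find_nearest_noun_py adj_idx words pos_tags → Spec_find_nearest_noun_py adj_idx words pos_tags (find_nearest_noun_py adj_idx words pos_tags)
def Claim_changed_find_nearest_noun_py : Prop := Dom_find_nearest_noun_py (pvDiffWitness_find_nearest_noun_py.1) (pvDiffWitness_find_nearest_noun_py.2.1) (pvDiffWitness_find_nearest_noun_py.2.2) ∧ Pre_find_nearest_noun_py (pvDiffWitness_find_nearest_noun_py.1) (pvDiffWitness_find_nearest_noun_py.2.1) (pvDiffWitness_find_nearest_noun_py.2.2) ∧ D_find_nearest_noun_py (pvDiffWitness_find_nearest_noun_py.1) (pvDiffWitness_find_nearest_noun_py.2.1) (pvDiffWitness_find_nearest_noun_py.2.2) ∧ find_nearest_noun_py (pvDiffWitness_find_nearest_noun_py.1) (pvDiffWitness_find_nearest_noun_py.2.1)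 (pvDiffWitness_find_nearest_noun_py.2.2) = pvDiffWitnessOut_find_nearest_noun_py.1 ∧ find_nearest_noun_py_alt (pvDiffWitness_find_nearest_noun_py.1) (pvDiffWitness_find_nearest_noun_py.2.1) (pvDiffWitness_find_nearest_noun_py.2.2) = pvDiffWitnessOut_find_nearest_noun_py.2 ∧ pvDiffWitnessOut_find_nearest_noun_py.1 ≠ pvDiffWitnessOut_find_nearest_noun_py.2
def Claim_exact_find_nearest_noun_py : Prop := ∀ (adj_idx : Int) (words : List String) (pos_tags : List String), Dom_find_nearest_noun_py adj_idx words pos_tags → Pre_find_nearest_noun_py adj_idx words pos_tags → D_find_nearest_noun_py adj_idx words pos_tags → find_nearest_noun_py adj_idx words pos_tags ≠ find_nearest_noun_py_alt adj_idx words pos_tags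

-- ===== LEMMAS AND PROOFS =====

-- abbreviations used only by the proofs
def pvE (tags : List String) : List (Int × String) := PySem.List.enumerate tags 0
def pvQ : Int × String → Bool := fun p => p.2 = "NN"
def pvH : Int × String → Int := fun p => p.1 + 1
def pvF' : Int × String → Option Int := fun p => if p.2 = "NN" then some (p.1 + 1) else none
def pvG2 (tags : List String) : Int → Int × String := fun j => (j, PySem.List.pyGetD tags j "")
def pvN (tags : List String) : List Int := ((pvE tags).filter pvQ).map Prod.fst

-- the two ports written over the proof abbreviations (definitional unfoldings)
theorem pvA_unfold (adj : Int) (words tags : List String) :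
    find_nearest_noun_py adj words tags =
      (match (PySem.List.pyRange (adj + 1) (PySem.List.len tags) 1).findSome? (pvNounHit tags) with
      | some r => r
      | none =>
        match (PySem.List.pyRange (adj - 1) (-1) (-1)).findSome? (pvNounHit tags) with
        | some r => r
        | none => 1) := rfl

theorem pvB_unfold (adj : Int) (words tags : List String) :
    find_nearest_noun_py_alt adj words tags =
      (match PySem.List.min? ((pvN tags).filter (fun i => decide (adj < i))) (fun y => y) with
      | some m => m + 1
      | none =>
        match PySem.List.max? ((pvN tags).filter (fun i => decide (i < adj))) (fun y => y) with
        | some m => m + 1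
        | none => 1) := rfl

theorem pv_findSome?_congr {α β : Type} (f g : α → Option β) (l : List α)
    (h : ∀ x ∈ l, f x = g x) : l.findSome? f = l.findSome? g := by
  induction l with
  | nil => rfl
  | cons x t ih =>
    simp only [List.findSome?_cons, h x (by simp)]
    cases g x with
    | some r => rfl
    | none => simpa using ih (fun y hy => h y (by simp [hy]))

theorem pv_findSome?_if {α β : Type} (p : α → Bool) (h : α → β) (l : List α) :
    l.findSome? (fun x => if p x then some (h x) else none) = (l.filter p).head?.map h := by
  induction l with
  | nil => rfl
  | cons x t ih =>
    by_cases hp : p x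
    · simp [List.findSome?_cons, List.filter_cons, hp]
    · simp only [Bool.not_eq_true] at hp
      simp [List.findSome?_cons, List.filter_cons, hp, ih]

theorem pvF'_eq_if (l : List (Int × String)) :
    l.findSome? pvF' = (l.filter pvQ).head?.map pvH := by
  have : pvF' = fun p => if pvQ p then some (pvH p) else none := by
    funext p; simp [pvF', pvQ, pvH]
  rw [this, pv_findSome?_if]

-- members of the noun-index list are nonnegative
theorem pvN_nonneg {tags : List String} {i : Int} (h : i ∈ pvN tags) : 0 ≤ i := by
  simp only [pvN, pvE, List.mem_map, List.mem_filter] at h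
  obtain ⟨p, ⟨hp, -⟩, rfl⟩ := h
  rw [PySem.List.mem_enumerate_iff] at hp
  obtain ⟨k, hk, rfl⟩ := hp
  simp

-- filter-by-lower-index on an enumerate is a drop
theorem pv_filter_le_drop (xs : List String) (s c : Int) :
    (PySem.List.enumerate xs s).filter (fun p => decide (c ≤ p.1)) =
      (PySem.List.enumerate xs s).drop (c - s).toNat := by
  induction xs generalizing s with
  | nil => simp [PySem.List.enumerate_nil]
  | cons x t ih =>
    rw [PySem.List.enumerate_cons]
    by_cases hc : c ≤ s
    · have h0 : (c - s).toNat = 0 := by omega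
      have h1 : (c - (s + 1)).toNat = 0 := by omega
      have ht := ih (s + 1)
      rw [h1, List.drop_zero] at ht
      simp [List.filter_cons, hc, h0, ht]
    · have h0 : (c - s).toNat = (c - (s + 1)).toNat + 1 := by omega
      simp [hc, h0, ih (s + 1)]

-- filter-by-upper-index on an enumerate is a take
theorem pv_filter_lt_take (xs : List String) (s c : Int) :
    (PySem.List.enumerate xs s).filter (fun p => decide (p.1 < c)) =
      (PySem.List.enumerate xs s).take (c - s).toNat := by
  induction xs generalizing s with
  | nil => simp [PySem.List.enumerate_nil]
  | cons x t ih =>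
    rw [PySem.List.enumerate_cons]
    by_cases hc : s < c
    · have h0 : (c - s).toNat = (c - (s + 1)).toNat + 1 := by omega
      simp [hc, h0, List.take_succ_cons, ih (s + 1)]
    · have h0 : (c - s).toNat = 0 := by omega
      have h1 : (c - (s + 1)).toNat = 0 := by omega
      rw [h0, List.take_zero, List.filter_cons]
      have ht := ih (s + 1)
      rw [h1, List.take_zero] at ht
      simp [hc, ht]

-- min of a strictly increasing list is its head
theorem pv_foldl_min (t : List Int) (x : Int) (h : ∀ y ∈ t, x ≤ y) : t.foldl min x = x := by
  induction t generalizing x with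
  | nil => rfl
  | cons y t ih =>
    have hxy : min x y = x := min_eq_left (h y (by simp))
    simp only [List.foldl_cons, hxy]
    exact ih x (fun z hz => h z (by simp [hz]))

theorem pv_min?_sorted (l : List Int) (h : l.Pairwise (· < ·)) :
    PySem.List.min? l (fun y => y) = l.head? := by
  cases l with
  | nil => rfl
  | cons x t =>
    rw [PySem.List.min?_id_cons]
    have hp := List.pairwise_cons.mp h
    rw [pv_foldl_min t x (fun y hy => le_of_lt (hp.1 y hy))]
    rfl

-- max of a strictly increasing list is its last element
theorem pv_foldl_max (t : List Int) (x : Int) (h : ∀ y ∈ t, x ≤ y) (hs : t.Pairwise (· < ·)) :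
    some (t.foldl max x) = (x :: t).getLast? := by
  induction t generalizing x with
  | nil => rfl
  | cons y t ih =>
    have hxy : max x y = y := max_eq_right (h y (by simp))
    have hp := List.pairwise_cons.mp hs
    simp only [List.foldl_cons, hxy]
    rw [ih y (fun z hz => le_of_lt (hp.1 z hz)) hp.2]
    rfl

theorem pv_max?_sorted (l : List Int) (h : l.Pairwise (· < ·)) :
    PySem.List.max? l (fun y => y) = l.getLast? := by
  cases l with
  | nil => rfl
  | cons x t =>
    rw [PySem.List.max?_id_cons]
    have hp := List.pairwise_cons.mp h
    exact pv_foldl_max t x (fun y hy => le_of_lt (hp.1 y hy)) hp.2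

theorem pvE_pairwise (tags : List String) : (pvE tags).Pairwise (fun p q => p.1 < q.1) :=
  PySem.List.pairwise_lt_enumerate tags 0

theorem pv_sorted_sub (tags : List String) (l : List (Int × String)) (hsub : l.Sublist (pvE tags)) :
    (l.map Prod.fst).Pairwise ((· < ·) : Int → Int → Prop) :=
  ((pvE_pairwise tags).sublist hsub).map Prod.fst (fun _ _ h => h)

-- the enumerate as a map over the full range, and its drop/take segments
theorem pvE_eq_map (tags : List String) :
    pvE tags = (PySem.List.pyRange 0 (tags.length : Int) 1).map (pvG2 tags) := by
  have := PySem.List.enumerate_eq_map_pyRange tags ""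
  simpa [pvE, pvG2, PySem.List.len_eq] using this

theorem pv_drop_eq_map (tags : List String) (a : Int) (h0 : 0 ≤ a) (hL : a ≤ (tags.length : Int)) :
    (pvE tags).drop a.toNat = (PySem.List.pyRange a (tags.length : Int) 1).map (pvG2 tags) := by
  rw [pvE_eq_map, PySem.List.pyRange_one_append 0 a (tags.length : Int) h0 hL, List.map_append]
  have hlen : ((PySem.List.pyRange 0 a 1).map (pvG2 tags)).length = a.toNat := by
    rw [List.length_map, PySem.List.length_pyRange_one]
    omega
  rw [← hlen, List.drop_left]

theorem pv_take_eq_map (tags : List String) (a : Int) (h0 : 0 ≤ a) (hL : a ≤ (tags.length : Int)) :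
    (pvE tags).take a.toNat = (PySem.List.pyRange 0 a 1).map (pvG2 tags) := by
  rw [pvE_eq_map, PySem.List.pyRange_one_append 0 a (tags.length : Int) h0 hL, List.map_append]
  have hlen : ((PySem.List.pyRange 0 a 1).map (pvG2 tags)).length = a.toNat := by
    rw [List.length_map, PySem.List.length_pyRange_one]
    omega
  rw [← hlen, List.take_left]

-- A's loop body agrees with pvF' ∘ pvG2 on in-range indices
theorem pvNounHit_eq (tags : List String) (i : Int) (h0 : 0 ≤ i) (hL : i < (tags.length : Int)) :
    pvNounHit tags i = pvF' (pvG2 tags i) := by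
  have hlt : i.toNat < tags.length := by omega
  have hg : PySem.List.pyGet? tags i = some tags[i.toNat] :=
    PySem.List.pyGet?_eq_some_getElem tags h0 (by simpa using hL)
  have hgd : PySem.List.pyGetD tags i "" = tags[i.toNat] :=
    PySem.List.pyGetD_eq_getElem tags "" h0 (by simpa using hL)
  simp only [pvNounHit, hg, pvF', pvG2, hgd]

-- A's right scan, for a nonnegative start bound
theorem pvA_right (tags : List String) (a : Int) (h0 : 0 ≤ a) (hL : a ≤ (tags.length : Int)) :
    (PySem.List.pyRange a (tags.length : Int) 1).findSome? (pvNounHit tags) =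
      (((pvE tags).drop a.toNat).filter pvQ).head?.map pvH := by
  rw [pv_findSome?_congr (pvNounHit tags) (fun i => pvF' (pvG2 tags i)) _
    (fun i hi => by
      rw [PySem.List.mem_pyRange_one] at hi
      exact pvNounHit_eq tags i (le_trans h0 hi.1) hi.2)]
  have hcomp : (fun i => pvF' (pvG2 tags i)) = pvF' ∘ pvG2 tags := rfl
  rw [hcomp, ← List.findSome?_map, ← pv_drop_eq_map tags a h0 hL, pvF'_eq_if]

-- B's right candidate list
theorem pvB_right (tags : List String) (adj : Int) (h : -1 ≤ adj) :
    (pvN tags).filter (fun i => decide (adj < i)) =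
      (((pvE tags).drop (adj + 1).toNat).filter pvQ).map Prod.fst := by
  rw [pvN, List.filter_map]
  have hcomm : ((pvE tags).filter pvQ).filter (fun p => decide (adj < p.1)) =
      ((pvE tags).filter (fun p => decide (adj + 1 ≤ p.1))).filter pvQ := by
    rw [List.filter_filter, List.filter_filter]
    exact List.filter_congr (fun p _ => by
      have he : decide (adj < p.1) = decide (adj + 1 ≤ p.1) :=
        decide_eq_decide.mpr Int.lt_iff_add_one_le
      rw [he, Bool.and_comm])
  have hco : ((fun i => decide (adj < i)) ∘ Prod.fst) =
      (fun p : Int × String => decide (adj < p.1)) := rfl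
  rw [hco, hcomm]
  have hd := pv_filter_le_drop tags 0 (adj + 1)
  rw [show pvE tags = PySem.List.enumerate tags 0 from rfl, hd]
  norm_num

-- B's left candidate list
theorem pvB_left (tags : List String) (adj : Int) :
    (pvN tags).filter (fun i => decide (i < adj)) =
      (((pvE tags).take adj.toNat).filter pvQ).map Prod.fst := by
  rw [pvN, List.filter_map]
  have hcomm : ((pvE tags).filter pvQ).filter (fun p => decide (p.1 < adj)) =
      ((pvE tags).filter (fun p => decide (p.1 < adj))).filter pvQ := by
    rw [List.filter_filter, List.filter_filter]
    exact List.filter_congr (fun p _ => Bool.and_comm _ _)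
  have hco : ((fun i => decide (i < adj)) ∘ Prod.fst) =
      (fun p : Int × String => decide (p.1 < adj)) := rfl
  rw [hco, hcomm]
  have ht := pv_filter_lt_take tags 0 adj
  rw [show pvE tags = PySem.List.enumerate tags 0 from rfl, ht]
  norm_num

-- main agreement, nonnegative adj
theorem pv_main_nonneg (adj : Int) (words tags : List String)
    (h0 : 0 ≤ adj) (hL : adj ≤ (tags.length : Int)) :
    find_nearest_noun_py adj words tags = find_nearest_noun_py_alt adj words tags := by
  have hR : (PySem.List.pyRange (adj + 1) (PySem.List.len tags) 1).findSome? (pvNounHit tags) =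
      (((pvE tags).drop (adj + 1).toNat).filter pvQ).head?.map pvH := by
    rcases lt_or_ge adj (tags.length : Int) with hlt | hge
    · rw [PySem.List.len_eq]; exact pvA_right tags (adj + 1) (by omega) (by omega)
    · rw [PySem.List.len_eq, PySem.List.pyRange_one_eq_nil (by omega)]
      have hnil : (pvE tags).drop (adj + 1).toNat = [] := by
        apply List.drop_eq_nil_of_le
        rw [pvE, PySem.List.length_enumerate]
        omega
      rw [hnil]
      rfl
  have hBR := pvB_right tags adj (by omega)
  have hminR := pv_min?_sorted ((((pvE tags).drop (adj + 1).toNat).filter pvQ).map Prod.fst)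
    (pv_sorted_sub tags _ (List.filter_sublist.trans (List.drop_sublist ..)))
  have hA_left : (PySem.List.pyRange (adj - 1) (-1) (-1)).findSome? (pvNounHit tags) =
      (((pvE tags).take adj.toNat).filter pvQ).getLast?.map pvH := by
    have hrev : PySem.List.pyRange (adj - 1) (-1) (-1) = (PySem.List.pyRange 0 adj 1).reverse := by
      have := PySem.List.pyRange_neg_one_eq_reverse (a := adj - 1) (b := -1)
      simpa using this
    rw [hrev,
      pv_findSome?_congr (pvNounHit tags) (fun i => pvF' (pvG2 tags i)) _
        (fun i hi => by
          rw [List.mem_reverse, PySem.List.mem_pyRange_one] at hi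
          exact pvNounHit_eq tags i hi.1 (lt_of_lt_of_le hi.2 hL))]
    have hcomp : (fun i => pvF' (pvG2 tags i)) = pvF' ∘ pvG2 tags := rfl
    rw [hcomp, ← List.findSome?_map, List.map_reverse, ← pv_take_eq_map tags adj h0 hL,
      pvF'_eq_if, List.filter_reverse, List.head?_reverse]
  have hmaxL := pv_max?_sorted ((((pvE tags).take adj.toNat).filter pvQ).map Prod.fst)
    (pv_sorted_sub tags _ (List.filter_sublist.trans (List.take_sublist ..)))
  rw [pvA_unfold, pvB_unfold, hR, hBR, hminR, List.head?_map]
  cases (((pvE tags).drop (adj + 1).toNat).filter pvQ).head? with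
  | some p => rfl
  | none =>
    simp only [Option.map_none]
    rw [hA_left, pvB_left tags adj, hmaxL, List.getLast?_map]
    cases (((pvE tags).take adj.toNat).filter pvQ).getLast? with
    | some p => rfl
    | none => rfl

-- the value Python's wraparound reads at a negative index i
theorem pv_pyGet?_neg (tags : List String) (i : Int)
    (hlo : -(tags.length : Int) ≤ i) (hhi : i ≤ -1) :
    PySem.List.pyGet? tags i = some (tags[tags.length - (-i).toNat]'(by omega)) := by
  obtain ⟨k, rfl⟩ : ∃ k : Nat, i = -(k : Int) := ⟨(-i).toNat, by omega⟩
  have hk1 : 0 < k := by omega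
  have hk2 : k ≤ tags.length := by omega
  have h3 : (-(-(k : Int))).toNat = k := by omega
  rw [PySem.List.pyGet?_neg_natCast tags k hk1 hk2, List.getElem?_eq_getElem (by omega)]
  simp

-- main agreement, negative adj (outside the wraparound difference region D_)
theorem pv_main_neg (adj : Int) (words tags : List String)
    (hneg : adj ≤ -1) (hlo : -(tags.length : Int) - 1 ≤ adj)
    (hD : ¬ ("NN" ∈ tags.drop ((tags.length : Int) + adj + 1).toNat ∧ adj ≤ -2)) :
    find_nearest_noun_py adj words tags = find_nearest_noun_py_alt adj words tags := by
  have hsplit : PySem.List.pyRange (adj + 1) (tags.length : Int) 1 =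
      PySem.List.pyRange (adj + 1) 0 1 ++ PySem.List.pyRange 0 (tags.length : Int) 1 :=
    PySem.List.pyRange_one_append (adj + 1) 0 (tags.length : Int) (by omega) (by positivity)
  have hprefix : (PySem.List.pyRange (adj + 1) 0 1).findSome? (pvNounHit tags) = none := by
    rw [List.findSome?_eq_none_iff]
    intro i hi
    rw [PySem.List.mem_pyRange_one] at hi
    have hg := pv_pyGet?_neg tags i (by omega) (by omega)
    have hne : tags[tags.length - (-i).toNat]'(by omega) ≠ "NN" := by
      intro hEq
      apply hD
      refine ⟨?_, by omega⟩
      have hmem : tags[tags.length - (-i).toNat]'(by omega) ∈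
          tags.drop ((tags.length : Int) + adj + 1).toNat := by
        have h2 : tags[tags.length - (-i).toNat]'(by omega) =
            (tags.drop ((tags.length : Int) + adj + 1).toNat)[tags.length - (-i).toNat -
              ((tags.length : Int) + adj + 1).toNat]'(by rw [List.length_drop]; omega) := by
          rw [List.getElem_drop]
          congr 1
          omega
        rw [h2]
        exact List.getElem_mem _
      rwa [hEq] at hmem
    simp only [pvNounHit, hg]
    simp [hne]
  have hR : (PySem.List.pyRange (adj + 1) (PySem.List.len tags) 1).findSome? (pvNounHit tags) =
      ((pvE tags).filter pvQ).head?.map pvH := by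
    rw [PySem.List.len_eq, hsplit, List.findSome?_append, hprefix, Option.none_or,
      pvA_right tags 0 le_rfl (by positivity)]
    simp
  have hBR : (pvN tags).filter (fun i => decide (adj < i)) = pvN tags :=
    List.filter_eq_self.mpr (fun i hi => decide_eq_true (by have := pvN_nonneg hi; omega))
  have hminR := pv_min?_sorted (pvN tags) (pv_sorted_sub tags _ List.filter_sublist)
  have hAL : PySem.List.pyRange (adj - 1) (-1) (-1) = [] :=
    PySem.List.pyRange_neg_one_eq_nil (by omega)
  have hBL : (pvN tags).filter (fun i => decide (i < adj)) = [] := by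
    rw [List.filter_eq_nil_iff]
    intro i hi
    have := pvN_nonneg hi
    simp
    omega
  rw [pvA_unfold, pvB_unfold, hR, hBR, hminR,
    show pvN tags = ((pvE tags).filter pvQ).map Prod.fst from rfl, List.head?_map]
  cases ((pvE tags).filter pvQ).head? with
  | some p => rfl
  | none =>
    simp only [Option.map_none]
    rw [hAL, show (((pvE tags).filter pvQ).map Prod.fst).filter (fun i => decide (i < adj)) = []
      from hBL]
    rfl

-- B's result is always positive
theorem pvB_pos (adj : Int) (words tags : List String) :
    1 ≤ find_nearest_noun_py_alt adj words tags := by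
  rw [pvB_unfold]
  cases hmin : PySem.List.min? ((pvN tags).filter (fun i => decide (adj < i))) (fun y => y) with
  | some m =>
    have hm := pvN_nonneg (List.mem_of_mem_filter (PySem.List.min?_mem hmin))
    show 1 ≤ m + 1
    omega
  | none =>
    cases hmax : PySem.List.max? ((pvN tags).filter (fun i => decide (i < adj))) (fun y => y) with
    | some m =>
      have hm := pvN_nonneg (List.mem_of_mem_filter (PySem.List.max?_mem hmax))
      show 1 ≤ m + 1
      omega
    | none => exact le_refl 1

-- A's result is non-positive inside D_
theorem pvA_nonpos (adj : Int) (words tags : List String)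
    (hlo : -(tags.length : Int) - 1 ≤ adj) (hadj : adj ≤ -2)
    (hmem : "NN" ∈ tags.drop ((tags.length : Int) + adj + 1).toNat) :
    find_nearest_noun_py adj words tags ≤ 0 := by
  obtain ⟨j, hj, hEq⟩ := List.getElem_of_mem hmem
  have hjlen : ((tags.length : Int) + adj + 1).toNat + j < tags.length := by
    rw [List.length_drop] at hj
    omega
  set i : Int := ((((tags.length : Int) + adj + 1).toNat + j : Nat) : Int) - (tags.length : Int)
    with hi
  have hi1 : adj + 1 ≤ i := by rw [hi]; omega
  have hi2 : i ≤ -1 := by rw [hi]; omega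
  have hhit : pvNounHit tags i = some (i + 1) := by
    have hg := pv_pyGet?_neg tags i (by omega) hi2
    have hsame : tags.length - (-i).toNat = ((tags.length : Int) + adj + 1).toNat + j := by omega
    have hv : tags[tags.length - (-i).toNat]'(by omega) = "NN" := by
      rw [← hEq, List.getElem_drop]
      simp only [hsame]
    simp only [pvNounHit, hg]
    rw [if_pos hv]
  have hsplit : PySem.List.pyRange (adj + 1) (tags.length : Int) 1 =
      PySem.List.pyRange (adj + 1) 0 1 ++ PySem.List.pyRange 0 (tags.length : Int) 1 :=
    PySem.List.pyRange_one_append (adj + 1) 0 (tags.length : Int) (by omega) (by positivity)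
  have hne : (PySem.List.pyRange (adj + 1) 0 1).findSome? (pvNounHit tags) ≠ none := by
    intro hnone
    rw [List.findSome?_eq_none_iff] at hnone
    have := hnone i (by rw [PySem.List.mem_pyRange_one]; omega)
    rw [hhit] at this
    exact Option.some_ne_none _ this
  obtain ⟨r, hr⟩ := Option.ne_none_iff_exists'.mp hne
  obtain ⟨x, hx, hxr⟩ := List.exists_of_findSome?_eq_some hr
  rw [PySem.List.mem_pyRange_one] at hx
  have hrval : r = x + 1 := by
    rw [pvNounHit] at hxr
    rcases hget : PySem.List.pyGet? tags x with _ | t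
    · rw [hget] at hxr; exact absurd hxr (by simp)
    · rw [hget] at hxr
      by_cases ht : t = "NN"
      · simp [ht] at hxr; omega
      · simp [ht] at hxr
  rw [pvA_unfold, PySem.List.len_eq, hsplit, List.findSome?_append, hr]
  simp only [Option.some_or]
  show r ≤ 0
  omega

-- ===== VERDICT (by name: the statement is the Claim_ definition above) =====
theorem find_nearest_noun_py_spec : Claim_unchanged_find_nearest_noun_py := by
  intro adj words tags _ hPre hD
  rw [Pre_find_nearest_noun_py] at hPre
  rw [D_find_nearest_noun_py] at hD
  rcases le_or_gt 0 adj with h0 | h0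
  · exact pv_main_nonneg adj words tags h0 hPre.2
  · exact pv_main_neg adj words tags (by omega) hPre.1 (fun ⟨a, b⟩ => hD ⟨b, a⟩)

theorem find_nearest_noun_py_changed : Claim_changed_find_nearest_noun_py := by
  unfold Claim_changed_find_nearest_noun_py; decide

theorem find_nearest_noun_py_tight : Claim_exact_find_nearest_noun_py := by
  intro adj words tags _ hPre hD
  rw [Pre_find_nearest_noun_py] at hPre
  rw [D_find_nearest_noun_py] at hD
  have h1 := pvA_nonpos adj words tags hPre.1 hD.1 hD.2
  have h2 := pvB_pos adj words tags
  omega
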